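-- pv_equiv track=rewrite | github.com/RobinJehn/aoc | 2023/day_13/day_13.py | checkSymmetry
-- ===== SOURCE A (Python) =====
-- def checkSymmetry(data, row):
--     assert row >= 0 and row < len(data)
--     pos = 0
--     while row - pos - 1 >= 0 and row + pos < len(data):
--         if data[row - pos - 1] != data[row + pos]:
--             return False
--         pos += 1
--     return True
-- ===== SOURCE B (Python) =====
-- def checkSymmetry(data, row):
--     assert row >= 0 and row < len(data)
--     k = min(row, len(data) - row)
--     window = data[row - k : row + k]
--     return window == window[::-1]
-- ===== Notes on version B (the rewrite author's own statement) =====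
-- stated objective: alternative
-- what changed: Instead of expanding an index outward and comparing mirror rows pairwise, B materialises the window of rows centered on the line (k = min(row, n-row) rows on each side) and tests whether that window is a palindrome via window == window[::-1].
import Mathlib
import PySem

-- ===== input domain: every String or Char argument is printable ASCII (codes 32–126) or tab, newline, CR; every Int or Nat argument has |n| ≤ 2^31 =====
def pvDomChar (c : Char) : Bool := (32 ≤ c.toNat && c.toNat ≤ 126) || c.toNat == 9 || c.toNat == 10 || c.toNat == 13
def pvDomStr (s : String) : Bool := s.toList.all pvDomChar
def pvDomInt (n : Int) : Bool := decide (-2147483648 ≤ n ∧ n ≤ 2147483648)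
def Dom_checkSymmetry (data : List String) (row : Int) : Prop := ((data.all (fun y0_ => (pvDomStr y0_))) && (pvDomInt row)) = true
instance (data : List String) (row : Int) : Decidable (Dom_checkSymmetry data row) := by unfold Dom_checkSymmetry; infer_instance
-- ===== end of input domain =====

-- B replaces A's outward index-expansion loop with a palindrome test on the window of
-- rows centered on the line: window = data[row-k:row+k], k = min(row, n-row), and
-- window == window[::-1]; objective: alternative (same cost, different algorithm).

-- ===== PORT A =====
-- the while loop: pos expands outward while both mirror indices are in range
def checkSymLoop (data : List String) (row : Int) (pos : Int) : Bool :=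
  if h : row - pos - 1 ≥ 0 ∧ row + pos < data.length then
    if PySem.List.pyGet? data (row - pos - 1) ≠ PySem.List.pyGet? data (row + pos) then false
    else checkSymLoop data row (pos + 1)
  else true
termination_by (row - pos).toNat
decreasing_by omega

def checkSymmetry (data : List String) (row : Int) : Bool :=
  checkSymLoop data row 0

-- ===== PORT B =====
def checkSymmetry_alt (data : List String) (row : Int) : Bool :=
  let k := min row ((data.length : Int) - row)
  let window := PySem.List.slice data (some (row - k)) (some (row + k))
  -- window[::-1]: a step -1 slice; slice? is none only for step 0, so getD [] is never taken
  window == ((PySem.List.slice? window none none (-1)).getD [])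

-- ===== PRECONDITION & SPEC =====
-- exactly A's assert: row outside [0, len(data)) raises AssertionError
def Pre_checkSymmetry (data : List String) (row : Int) : Prop :=
  0 ≤ row ∧ row < data.length
instance (data : List String) (row : Int) : Decidable (Pre_checkSymmetry data row) := by unfold Pre_checkSymmetry; infer_instance
def pvWitness_checkSymmetry : List String × Int := (["ab", "cd", "cd", "ab"], 2)

def Spec_checkSymmetry (data : List String) (row : Int) (out : Bool) : Prop := out = checkSymmetry_alt data row
instance (data : List String) (row : Int) (out : Bool) : Decidable (Spec_checkSymmetry data row out) := by unfold Spec_checkSymmetry; infer_instance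

-- ===== CLAIM (what is proved, stated in full; the proofs are below) =====
def Claim_equal_checkSymmetry : Prop := ∀ (data : List String) (row : Int), Dom_checkSymmetry data row → Pre_checkSymmetry data row → Spec_checkSymmetry data row (checkSymmetry data row)

-- ===== LEMMAS AND PROOFS =====

-- The loop from position pos equals `all` over the zipped mirror pairs with the first pos pairs dropped.
lemma checkSymLoop_eq_all (data : List String) (r p : Nat) (hr : r ≤ data.length) :
    checkSymLoop data (r : Int) (p : Int) =
      ((((data.take r).reverse).zip (data.drop r)).drop p).all (fun q => q.1 == q.2) := by
  by_cases hcond : p < r ∧ r + p < data.length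
  · obtain ⟨hp, hn⟩ := hcond
    have hz : (((data.take r).reverse).zip (data.drop r)).length = min r (data.length - r) := by
      simp [List.length_take]
    have hpz : p < (((data.take r).reverse).zip (data.drop r)).length := by omega
    have hleft : ((data.take r).reverse)[p]'(by simp [List.length_take]; omega) = data[r - 1 - p]'(by omega) := by
      rw [List.getElem_reverse]
      rw [List.getElem_take]
      congr 1
      simp [List.length_take]
      omega
    have hright : (data.drop r)[p]'(by simp [List.length_drop]; omega) = data[r + p]'(by omega) := by
      simp
    rw [checkSymLoop]
    have hc : ((r : Int) - p - 1 ≥ 0 ∧ (r : Int) + p < data.length) := by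
      constructor <;> [omega; (push_cast; omega)]
    rw [dif_pos hc]
    have hg1 : PySem.List.pyGet? data ((r : Int) - p - 1) = some (data[r - 1 - p]'(by omega)) := by
      have : ((r : Int) - p - 1) = ((r - 1 - p : Nat) : Int) := by omega
      rw [this, PySem.List.pyGet?_natCast, List.getElem?_eq_getElem]
    have hg2 : PySem.List.pyGet? data ((r : Int) + p) = some (data[r + p]'(by omega)) := by
      have : ((r : Int) + p) = ((r + p : Nat) : Int) := by omega
      rw [this, PySem.List.pyGet?_natCast, List.getElem?_eq_getElem]
    have hdrop : (((data.take r).reverse).zip (data.drop r)).drop p =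
        (((data.take r).reverse)[p]'(by simp [List.length_take]; omega),
         (data.drop r)[p]'(by simp [List.length_drop]; omega)) ::
        (((data.take r).reverse).zip (data.drop r)).drop (p + 1) := by
      rw [List.drop_eq_getElem_cons hpz]
      congr 1
      rw [List.getElem_zip]
    rw [hdrop, List.all_cons, hleft, hright, hg1, hg2]
    by_cases heq : data[r - 1 - p]'(by omega) = data[r + p]'(by omega)
    · rw [if_neg (by simp [heq])]
      simp only [heq, beq_self_eq_true, Bool.true_and]
      have hrec : checkSymLoop data (r : Int) ((p : Int) + 1) =
          ((((data.take r).reverse).zip (data.drop r)).drop (p + 1)).all (fun q => q.1 == q.2) := by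
        have h1 : ((p : Int) + 1) = ((p + 1 : Nat) : Int) := by push_cast; ring
        rw [h1]; exact checkSymLoop_eq_all data r (p + 1) hr
      exact hrec
    · rw [if_pos (by simp [heq])]
      simp [beq_eq_false_iff_ne.mpr heq]
  · rw [checkSymLoop]
    rw [dif_neg (by omega)]
    have hz : (((data.take r).reverse).zip (data.drop r)).length = min r (data.length - r) := by
      simp [List.length_zip, List.length_take, List.length_drop]
    rw [List.drop_eq_nil_of_le (by omega)]
    rfl
termination_by r - p
decreasing_by omega

-- all-equal over a zip is equality of the mutual-length prefixes
lemma zip_all_eq {α : Type} [DecidableEq α] (u v : List α) :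
    ((u.zip v).all (fun q => q.1 == q.2)) = (u.take v.length == v.take u.length) := by
  induction u generalizing v with
  | nil => simp
  | cons a u ih =>
    cases v with
    | nil => simp
    | cons b v =>
      simp only [List.zip_cons_cons, List.all_cons, List.length_cons, List.take_succ_cons,
        List.cons_beq_cons, ih]

-- palindrome of (x.reverse ++ y) with |x| = |y| means x = y
lemma rev_append_palindrome {α : Type} [DecidableEq α] (x y : List α) (hl : x.length = y.length) :
    ((x.reverse ++ y) == (x.reverse ++ y).reverse) = (x == y) := by
  rw [List.reverse_append, List.reverse_reverse]
  by_cases h : x = y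
  · subst h; simp
  · have h2 : ¬ (x.reverse ++ y = y.reverse ++ x) := by
      intro he
      exact h ((List.append_inj he (by simpa using hl)).2.symm ▸
        rfl)
    simp [h, h2]

-- ===== VERDICT (by name: the statement is the Claim_ definition above) =====
theorem checkSymmetry_spec : Claim_equal_checkSymmetry := by
  intro data row _ hpre
  obtain ⟨h0, hlt⟩ := hpre
  unfold Spec_checkSymmetry checkSymmetry
  obtain ⟨r, rfl⟩ : ∃ r : Nat, row = (r : Int) := ⟨row.toNat, (Int.toNat_of_nonneg h0).symm⟩
  have hr : r ≤ data.length := by exact_mod_cast hlt.le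
  -- the common half-width
  set k : Nat := min r (data.length - r) with hk
  have hkr : k ≤ r := by omega
  have hkn : k ≤ data.length - r := by omega
  -- A-side: loop = prefix equality of the two k-length sides
  have hA : checkSymLoop data (r : Int) 0 =
      (((data.take r).reverse).take k == (data.drop r).take k) := by
    have := checkSymLoop_eq_all data r 0 hr
    rw [show ((0:Nat):Int) = (0:Int) from rfl] at this
    rw [this, List.drop_zero, zip_all_eq]
    have hlu : ((data.take r).reverse).length = r := by simp [List.length_take]; omega
    have hlv : (data.drop r).length = data.length - r := by simp
    rw [hlu, hlv]
    congr 1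
    · rw [List.take_eq_take_iff]; omega
    · rw [List.take_eq_take_iff]; omega
  -- B-side: the window is (left side reversed) ++ right side
  have hmin : min (r : Int) ((data.length : Int) - r) = ((k : Nat) : Int) := by omega
  have hlo : (r : Int) - ((k : Nat) : Int) = ((r - k : Nat) : Int) := by omega
  have hhi : (r : Int) + ((k : Nat) : Int) = ((r + k : Nat) : Int) := by push_cast; ring
  have hwin : PySem.List.slice data (some ((r : Int) - min (r : Int) ((data.length : Int) - r)))
        (some ((r : Int) + min (r : Int) ((data.length : Int) - r))) =
      (((data.take r).reverse).take k).reverse ++ (data.drop r).take k := by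
    rw [hmin, hlo, hhi, PySem.List.slice_natCast]
    have h2k : (r + k) - (r - k) = 2 * k := by omega
    rw [h2k]
    have hsplit : data.drop (r - k) = (data.take r).drop (r - k) ++ data.drop r := by
      conv_lhs => rw [← List.take_append_drop r data]
      rw [List.drop_append_of_le_length (by simp; omega)]
    rw [hsplit, List.take_append]
    have hl1 : ((data.take r).drop (r - k)).length = k := by simp; omega
    rw [List.take_of_length_le (by omega), hl1]
    congr 1
    · rw [List.take_reverse, List.reverse_reverse]
      congr 1
      simp
      omega
    · congr 1
      omega
  rw [hA]
  simp only [checkSymmetry_alt, PySem.List.slice?_none_none_neg_one, Option.getD_some, hwin]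
  rw [rev_append_palindrome]
  simp [List.length_take]
  omega
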